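-- pv_equiv track=rewrite | github.com/karimr19/pythonApiProject | help_functions.py | validate_time_list
-- ===== SOURCE A (Python) =====
-- def validate_time_list(hours_minutes_list):
--     is_correct = True
--     # Проверяем корректность времени.
--     for i in range(0, len(hours_minutes_list)):
--         if hours_minutes_list[i][0] > 23 or hours_minutes_list[i][0] < 0:
--             is_correct = False
--             break
--         if hours_minutes_list[i][1] > 59 or hours_minutes_list[i][1] < 0:
--             is_correct = False
--             break
--     if is_correct:
--         # Проверяем, чтобы левая граница была меньше правой.
--         for i in range(0, len(hours_minutes_list), 2):
--             left = hours_minutes_list[i][0] * 100 + hours_minutes_list[i][1]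
--             right = hours_minutes_list[i + 1][0] * 100 + hours_minutes_list[i + 1][1]
--             if left >= right:
--                 is_correct = False
--                 break
--     return is_correct
-- ===== SOURCE B (Python) =====
-- def validate_time_list(hours_minutes_list):
--     rest = hours_minutes_list
--     while rest:
--         h1, m1 = rest[0]
--         if not (0 <= h1 <= 23 and 0 <= m1 <= 59):
--             return False
--         h2, m2 = rest[1]
--         if not (0 <= h2 <= 23 and 0 <= m2 <= 59):
--             return False
--         if h1 * 100 + m1 >= h2 * 100 + m2:
--             return False
--         rest = rest[2:]
--     return True
-- ===== Notes on version B (the rewrite author's own statement) =====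
-- stated objective: simpler
-- what changed: A's two separate loops (a full bound-check pass over every element, then a stride-2 index loop recomputing left/right for the ordering check) are fused into one structural pass that walks the list two elements at a time with early returns.
import Mathlib
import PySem

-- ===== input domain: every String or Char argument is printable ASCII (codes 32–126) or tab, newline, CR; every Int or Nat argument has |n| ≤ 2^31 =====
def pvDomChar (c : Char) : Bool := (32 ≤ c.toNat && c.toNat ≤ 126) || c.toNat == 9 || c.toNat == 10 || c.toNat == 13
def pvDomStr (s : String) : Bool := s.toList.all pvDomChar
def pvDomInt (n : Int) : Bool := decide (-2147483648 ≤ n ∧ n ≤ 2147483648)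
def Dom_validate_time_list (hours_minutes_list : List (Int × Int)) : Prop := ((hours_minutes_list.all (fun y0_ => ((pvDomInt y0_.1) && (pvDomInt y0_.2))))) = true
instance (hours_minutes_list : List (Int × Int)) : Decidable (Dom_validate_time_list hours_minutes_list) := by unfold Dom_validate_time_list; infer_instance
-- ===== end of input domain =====

-- B replaces A's two separate loops (a full bound-check pass, then a stride-2 index loop
-- with its left/right ordering check) by ONE structural pass over the list two elements at
-- a time (objective: simpler — one fused early-return loop instead of two).

-- ===== PORT A =====
-- first loop of A: bound check of every element, with break
def pvBoundLoop : List (Int × Int) → Bool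
  | [] => true
  | p :: rest =>
    if p.1 > 23 || p.1 < 0 then false
    else if p.2 > 59 || p.2 < 0 then false
    else pvBoundLoop rest

-- second loop of A: for i in range(0, len, 2), ordering check; `none` from pyGet? is
-- Python's IndexError at index i+1 (excluded by Pre_; the port returns false there)
def pvOrderLoop (l : List (Int × Int)) : List Int → Bool
  | [] => true
  | i :: rest =>
    match PySem.List.pyGet? l i, PySem.List.pyGet? l (i + 1) with
    | some p, some q =>
      if p.1 * 100 + p.2 ≥ q.1 * 100 + q.2 then false else pvOrderLoop l rest
    | _, _ => false

def validate_time_list (hours_minutes_list : List (Int × Int)) : Bool :=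
  let is_correct := pvBoundLoop hours_minutes_list
  if is_correct then
    pvOrderLoop hours_minutes_list
      (PySem.List.pyRange 0 (hours_minutes_list.length : Int) 2)
  else is_correct

-- ===== PORT B =====
-- `not (0 <= h <= 23 and 0 <= m <= 59)` of Source B
def pvAltBad (p : Int × Int) : Bool :=
  !(decide (0 ≤ p.1) && decide (p.1 ≤ 23) && decide (0 ≤ p.2) && decide (p.2 ≤ 59))

-- Source B's while loop over `rest`, two elements at a time; on a one-element remainder
-- Python raises IndexError at rest[1] (excluded by Pre_; the port returns false there)
def pvAltLoop : List (Int × Int) → Bool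
  | [] => true
  | [_] => false
  | p :: q :: rest =>
    if pvAltBad p then false
    else if pvAltBad q then false
    else if p.1 * 100 + p.2 ≥ q.1 * 100 + q.2 then false
    else pvAltLoop rest

def validate_time_list_alt (hours_minutes_list : List (Int × Int)) : Bool :=
  pvAltLoop hours_minutes_list

-- ===== PRECONDITION & SPEC =====
-- Pre_ excludes exactly the inputs on which Python A raises IndexError: odd length with
-- every bound valid and every complete pair correctly ordered; it excludes no input on
-- which A returns.
def Pre_validate_time_list (hours_minutes_list : List (Int × Int)) : Prop :=
  hours_minutes_list.length % 2 = 0 ∨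
  (∃ p ∈ hours_minutes_list, p.1 > 23 ∨ p.1 < 0 ∨ p.2 > 59 ∨ p.2 < 0) ∨
  (∃ k ∈ List.range (hours_minutes_list.length / 2),
    (hours_minutes_list.getD (2 * k) (0, 0)).1 * 100 +
        (hours_minutes_list.getD (2 * k) (0, 0)).2 ≥
      (hours_minutes_list.getD (2 * k + 1) (0, 0)).1 * 100 +
        (hours_minutes_list.getD (2 * k + 1) (0, 0)).2)
instance (hours_minutes_list : List (Int × Int)) : Decidable (Pre_validate_time_list hours_minutes_list) := by
  unfold Pre_validate_time_list; infer_instance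

def pvWitness_validate_time_list : (List (Int × Int)) := [(0, 0), (1, 0)]

def Spec_validate_time_list (hours_minutes_list : List (Int × Int)) (out : Bool) : Prop := out = validate_time_list_alt hours_minutes_list
instance (hours_minutes_list : List (Int × Int)) (out : Bool) : Decidable (Spec_validate_time_list hours_minutes_list out) := by unfold Spec_validate_time_list; infer_instance

-- ===== CLAIM (what is proved, stated in full; the proofs are below) =====
def Claim_equal_validate_time_list : Prop := ∀ (hours_minutes_list : List (Int × Int)), Dom_validate_time_list hours_minutes_list → Pre_validate_time_list hours_minutes_list → Spec_validate_time_list hours_minutes_list (validate_time_list hours_minutes_list)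

-- ===== LEMMAS AND PROOFS =====

-- B's combined bound test as A's two tests
theorem pvAltBad_true (p : Int × Int) (h : p.1 > 23 ∨ p.1 < 0 ∨ p.2 > 59 ∨ p.2 < 0) :
    pvAltBad p = true := by
  simp only [pvAltBad, Bool.not_eq_eq_eq_not, Bool.not_true, Bool.and_eq_false_iff,
    decide_eq_false_iff_not]
  omega

theorem pvAltBad_false (p : Int × Int) (h : ¬(p.1 > 23 ∨ p.1 < 0 ∨ p.2 > 59 ∨ p.2 < 0)) :
    pvAltBad p = false := by
  simp only [pvAltBad, Bool.not_eq_eq_eq_not, Bool.not_false, Bool.and_eq_true,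
    decide_eq_true_eq]
  omega

theorem pvBoundLoop_cons_bad (p : Int × Int) (rest : List (Int × Int))
    (h : p.1 > 23 ∨ p.1 < 0 ∨ p.2 > 59 ∨ p.2 < 0) : pvBoundLoop (p :: rest) = false := by
  simp only [pvBoundLoop]
  split_ifs with h1 h2
  · rfl
  · rfl
  · exfalso
    simp only [Bool.or_eq_true, decide_eq_true_eq, not_or] at h1 h2
    omega

theorem pvBoundLoop_cons_good (p : Int × Int) (rest : List (Int × Int))
    (h : ¬(p.1 > 23 ∨ p.1 < 0 ∨ p.2 > 59 ∨ p.2 < 0)) :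
    pvBoundLoop (p :: rest) = pvBoundLoop rest := by
  simp only [pvBoundLoop]
  rw [if_neg (by simp only [Bool.or_eq_true, decide_eq_true_eq]; omega),
    if_neg (by simp only [Bool.or_eq_true, decide_eq_true_eq]; omega)]

-- range(0, n, 2) as a mapped List.range
theorem pyRange2_eq (n : Nat) :
    PySem.List.pyRange 0 (n : Int) 2 =
      (List.range ((n + 1) / 2)).map (fun k : Nat => (2 : Int) * (k : Int)) := by
  rw [PySem.List.pyRange_of_pos 0 (n : Int) (by norm_num)]
  have hc : (if (0 : Int) < (n : Int) then (((n : Int) - 0 + 2 - 1) / 2).toNat else 0)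
      = (n + 1) / 2 := by
    split_ifs with h
    · have : ((n : Int) - 0 + 2 - 1) = ((n + 1 : Nat) : Int) := by push_cast; ring
      rw [this]
      rw [show ((2 : Int)) = ((2 : Nat) : Int) from rfl, ← Int.natCast_div, Int.toNat_natCast]
    · have hn : n = 0 := by omega
      simp [hn]
  rw [hc]
  simp only [zero_add]

-- shifting the index list by 2 drops the first two elements
theorem pvOrderLoop_shift (p q : Int × Int) (l : List (Int × Int)) :
    ∀ ks : List Nat,
      pvOrderLoop (p :: q :: l) (ks.map (fun k : Nat => (2 : Int) * (k : Int) + 2)) =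
        pvOrderLoop l (ks.map (fun k : Nat => (2 : Int) * (k : Int))) := by
  intro ks
  induction ks with
  | nil => rfl
  | cons k ks ih =>
    simp only [List.map_cons, pvOrderLoop]
    have h1 : PySem.List.pyGet? (p :: q :: l) ((2 : Int) * k + 2) =
        PySem.List.pyGet? l ((2 : Int) * k) := by
      have e : ((2 : Int) * k + 2) = (((2 * k + 2 : Nat) : Int)) := by push_cast; ring
      have e2 : ((2 : Int) * k) = (((2 * k : Nat) : Int)) := by push_cast; ring
      rw [e, e2, PySem.List.pyGet?_natCast, PySem.List.pyGet?_natCast]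
      simp [show 2 * k + 2 = (2 * k) + 1 + 1 by omega]
    have h2 : PySem.List.pyGet? (p :: q :: l) ((2 : Int) * k + 2 + 1) =
        PySem.List.pyGet? l ((2 : Int) * k + 1) := by
      have e : ((2 : Int) * k + 2 + 1) = (((2 * k + 3 : Nat) : Int)) := by push_cast; ring
      have e2 : ((2 : Int) * k + 1) = (((2 * k + 1 : Nat) : Int)) := by push_cast; ring
      rw [e, e2, PySem.List.pyGet?_natCast, PySem.List.pyGet?_natCast]
      simp [show 2 * k + 3 = (2 * k + 1) + 1 + 1 by omega]
    rw [h1, h2]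
    cases hg : PySem.List.pyGet? l ((2 : Int) * k) with
    | none => rfl
    | some a =>
      cases hg' : PySem.List.pyGet? l ((2 : Int) * k + 1) with
      | none => rfl
      | some b =>
        dsimp only
        split_ifs with h
        · rfl
        · exact ih

-- one unfolding of A's second loop on a list of length n + 2
theorem pvOrderLoop_cons (p q : Int × Int) (l : List (Int × Int)) :
    pvOrderLoop (p :: q :: l) (PySem.List.pyRange 0 ((p :: q :: l).length : Int) 2) =
      if p.1 * 100 + p.2 ≥ q.1 * 100 + q.2 then false
      else pvOrderLoop l (PySem.List.pyRange 0 (l.length : Int) 2) := by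
  rw [show ((p :: q :: l).length) = l.length + 2 from rfl]
  rw [pyRange2_eq, pyRange2_eq]
  rw [show (l.length + 2 + 1) / 2 = (l.length + 1) / 2 + 1 by omega]
  rw [List.range_succ_eq_map]
  simp only [List.map_cons, List.map_map, Nat.cast_zero, mul_zero]
  have hmap : ((List.range ((l.length + 1) / 2)).map ((fun k : Nat => (2 : Int) * (k : Int)) ∘ Nat.succ)) =
      (List.range ((l.length + 1) / 2)).map (fun k : Nat => (2 : Int) * (k : Int) + 2) := by
    apply List.map_congr_left
    intro k _
    show (2 : Int) * ((k + 1 : Nat) : Int) = 2 * k + 2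
    push_cast
    ring
  rw [hmap]
  have g0 : PySem.List.pyGet? (p :: q :: l) 0 = some p := by
    rw [show (0 : Int) = ((0 : Nat) : Int) from rfl, PySem.List.pyGet?_natCast]
    rfl
  have g1 : PySem.List.pyGet? (p :: q :: l) (0 + 1) = some q := by
    rw [show ((0 : Int) + 1) = ((1 : Nat) : Int) by norm_num, PySem.List.pyGet?_natCast]
    rfl
  simp only [pvOrderLoop, g0, g1]
  split_ifs with h
  · rfl
  · exact pvOrderLoop_shift p q l (List.range ((l.length + 1) / 2))

-- the core equality: A's value equals B's value on EVERY input (the ports agree even at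
-- the inputs Pre_ excludes, where both Pythons raise and both ports return false)
theorem pvMainEq : ∀ l : List (Int × Int), validate_time_list l = pvAltLoop l
  | [] => rfl
  | [p] => by
    show validate_time_list [p] = false
    simp only [validate_time_list]
    by_cases hb : pvBoundLoop [p] = true
    · simp only [hb, if_true]
      show pvOrderLoop [p] (PySem.List.pyRange 0 ((1 : Nat) : Int) 2) = false
      rfl
    · simp only [Bool.not_eq_true] at hb
      simp only [hb, Bool.false_eq_true, if_false]
  | p :: q :: rest => by
    have ih := pvMainEq rest
    by_cases hp : p.1 > 23 ∨ p.1 < 0 ∨ p.2 > 59 ∨ p.2 < 0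
    · -- p out of bounds: both are false
      simp only [validate_time_list, pvAltLoop, pvBoundLoop_cons_bad p (q :: rest) hp,
        pvAltBad_true p hp, Bool.false_eq_true, if_false, if_true]
    · by_cases hq : q.1 > 23 ∨ q.1 < 0 ∨ q.2 > 59 ∨ q.2 < 0
      · -- q out of bounds: both are false
        simp only [validate_time_list, pvAltLoop, pvBoundLoop_cons_good p (q :: rest) hp,
          pvBoundLoop_cons_bad q rest hq, pvAltBad_false p hp, pvAltBad_true q hq,
          Bool.false_eq_true, if_false, if_true]
      · -- both in bounds
        simp only [validate_time_list, pvAltLoop, pvBoundLoop_cons_good p (q :: rest) hp,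
          pvBoundLoop_cons_good q rest hq, pvAltBad_false p hp, pvAltBad_false q hq,
          Bool.false_eq_true, if_false]
        rw [pvOrderLoop_cons]
        cases hbr : pvBoundLoop rest with
        | true =>
          simp only [validate_time_list, hbr, if_true] at ih
          simp only [if_true]
          split_ifs with h
          · rfl
          · exact ih
        | false =>
          simp only [validate_time_list, hbr, Bool.false_eq_true, if_false] at ih
          simp only [Bool.false_eq_true, if_false]
          rw [← ih]
          split_ifs <;> rfl

-- ===== VERDICT (by name: the statement is the Claim_ definition above) =====
theorem validate_time_list_spec : Claim_equal_validate_time_list := by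
  intro l _ _
  unfold Spec_validate_time_list validate_time_list_alt
  exact pvMainEq l
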